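-- pv_equiv track=rewrite | github.com/nativegold/coding-challenges | 프로그래머스/lv1/42840. 모의고사/모의고사.py | solution
-- ===== SOURCE A (Python) =====
-- def solution(answers):
--     answer = []
--     correct_count = [[i, 0] for i in range(1, 4)]
--     index = [0] * 3
--     way1 = [1, 2, 3, 4, 5]
--     way2 = [2, 1, 2, 3, 2, 4, 2, 5]
--     way3 = [3, 3, 1, 1, 2, 2, 4, 4, 5, 5]
--
--     for ans in answers:
--         if ans == way1[index[0]]:
--             correct_count[0][1] += 1
--         if ans == way2[index[1]]:
--             correct_count[1][1] += 1
--         if ans == way3[index[2]]: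
--             correct_count[2][1] += 1
--
--         index[0] += 1
--         index[1] += 1
--         index[2] += 1
--
--         if index[0] == len(way1):
--             index[0] = 0
--         if index[1] == len(way2):
--             index[1] = 0
--         if index[2] == len(way3):
--             index[2] = 0
--
--     correct_count.sort(reverse=True, key=lambda x:x[1])
--     max_count = 0
--
--     for stu, cnt in correct_count:
--         if max_count < cnt:
--             max_count = cnt
--
--         if max_count == cnt:
--             answer.append(stu)
--
--     return sorted(answer)
-- ===== SOURCE B (Python) =====
-- def solution(answers):
--     ways = [[1, 2, 3, 4, 5],
--             [2, 1, 2, 3, 2, 4, 2, 5],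
--             [3, 3, 1, 1, 2, 2, 4, 4, 5, 5]]
--     # Histogram keyed by (position mod 40, answer value); 40 = lcm of the
--     # three pattern lengths, so each student's score is a fixed 40-entry
--     # lookup into the histogram -- answers is read exactly once.
--     hist = {}
--     for i, a in enumerate(answers):
--         key = (i % 40, a)
--         hist[key] = hist.get(key, 0) + 1
--     scores = [sum(hist.get((r, w[r % len(w)]), 0) for r in range(40)) for w in ways]
--     best = max(scores)
--     return [k + 1 for k in range(3) if scores[k] == best]
-- ===== Notes on version B (the rewrite author's own statement) =====
-- stated objective: alternative
-- what changed: B builds a histogram keyed by (position mod 40, answer) in one pass and then computes each student's score as 40 dictionary lookups against the pattern table, replacing A's per-answer comparison loop with three wrap-around index counters, the mutable [student,count] pair list, the reverse sort and the max-tracking append loop with max(scores) and a range(3) filter.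
import Mathlib
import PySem

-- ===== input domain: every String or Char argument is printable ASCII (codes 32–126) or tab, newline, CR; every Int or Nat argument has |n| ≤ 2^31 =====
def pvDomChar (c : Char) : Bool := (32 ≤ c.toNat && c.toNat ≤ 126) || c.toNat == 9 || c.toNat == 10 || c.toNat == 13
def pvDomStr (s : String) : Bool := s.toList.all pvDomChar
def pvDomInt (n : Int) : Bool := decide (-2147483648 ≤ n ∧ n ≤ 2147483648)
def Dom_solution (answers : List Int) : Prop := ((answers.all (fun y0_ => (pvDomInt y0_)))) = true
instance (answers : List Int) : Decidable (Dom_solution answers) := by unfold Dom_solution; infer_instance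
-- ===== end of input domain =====

-- B scores the students from a (position mod 40, answer) histogram built in one pass
-- (40 = lcm of the pattern lengths), instead of A's per-answer comparison loop with
-- wrap-around counters, reverse sort and max-tracking append loop (objective: alternative).

-- ===== PORT A =====
-- per-student loop body of A: count increment and wrap-around index update
-- (way[index] is always in range since the index wraps before reaching len; pyGetD's default is never used)
def pvStepA (way : List Int) (s : Int × Int) (ans : Int) : Int × Int :=
  let c := if ans = PySem.List.pyGetD way s.2 0 then s.1 + 1 else s.1
  let i := s.2 + 1
  (c, if i = (way.length : Int) then 0 else i)

def solution (answers : List Int) : List Int :=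
  let way1 : List Int := [1, 2, 3, 4, 5]
  let way2 : List Int := [2, 1, 2, 3, 2, 4, 2, 5]
  let way3 : List Int := [3, 3, 1, 1, 2, 2, 4, 4, 5, 5]
  -- the loop: state = ([student,count] with its index) for each of the three students
  let st := answers.foldl
    (fun (s : (Int × Int) × (Int × Int) × (Int × Int)) ans =>
      (pvStepA way1 s.1 ans, pvStepA way2 s.2.1 ans, pvStepA way3 s.2.2 ans))
    ((0, 0), (0, 0), (0, 0))
  let correct_count : List (Int × Int) := [(1, st.1.1), (2, st.2.1.1), (3, st.2.2.1)]
  let sortedCC := PySem.List.sorted correct_count (fun x => x.2) true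
  let fin := sortedCC.foldl
    (fun (s : Int × List Int) p =>
      let m := if s.1 < p.2 then p.2 else s.1
      (m, if m = p.2 then s.2 ++ [p.1] else s.2))
    (0, [])
  PySem.List.sorted fin.2 (fun x => x) false

-- ===== PORT B =====
-- the histogram: hist[(i % 40, a)] += 1 over enumerate(answers)
def pvHist (answers : List Int) : PySem.Dict (Int × Int) Int :=
  (PySem.List.enumerate answers).foldl
    (fun d ia =>
      let k : Int × Int := (PySem.Int.mod ia.1 40, ia.2)
      d.insert k (d.getD k 0 + 1))
    PySem.Dict.empty

-- one student's score: sum(hist.get((r, w[r % len(w)]), 0) for r in range(40))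
def pvScoreB (hist : PySem.Dict (Int × Int) Int) (w : List Int) : Int :=
  ((PySem.List.pyRange 0 40 1).map
    (fun r => hist.getD (r, PySem.List.pyGetD w (PySem.Int.mod r (w.length : Int)) 0) 0)).sum

def solution_alt (answers : List Int) : List Int :=
  let ways : List (List Int) :=
    [[1, 2, 3, 4, 5], [2, 1, 2, 3, 2, 4, 2, 5], [3, 3, 1, 1, 2, 2, 4, 4, 5, 5]]
  let hist := pvHist answers
  let scores := ways.map (pvScoreB hist)
  -- max(scores): scores has three elements, so the default of getD is never used
  let best := (PySem.List.max? scores (fun s => s)).getD 0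
  -- scores[k] is in range for k in range(3); pyGetD's default is never used
  (PySem.List.pyRange 0 3 1).filterMap
    (fun k => if PySem.List.pyGetD scores k 0 = best then some (k + 1) else none)

-- ===== PRECONDITION & SPEC =====
def Spec_solution (answers : List Int) (out : List Int) : Prop := out = solution_alt answers
instance (answers : List Int) (out : List Int) : Decidable (Spec_solution answers out) := by unfold Spec_solution; infer_instance

-- ===== CLAIM (what is proved, stated in full; the proofs are below) =====
def Claim_equal_solution : Prop := ∀ (answers : List Int), Dom_solution answers → Spec_solution answers (solution answers)

-- ===== LEMMAS AND PROOFS =====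

theorem pvModSucc (s L : Int) (hL : 0 < L) :
    (s + 1) % L = if s % L + 1 = L then 0 else s % L + 1 := by
  have h1 : 0 ≤ s % L := Int.emod_nonneg s (by omega)
  have h2 : s % L < L := Int.emod_lt_of_pos s hL
  have key : (s + 1) % L = (s % L + 1) % L := by
    conv_lhs => rw [show s + 1 = s % L + 1 + L * (s / L) by
      have h := Int.emod_add_mul_ediv s L; linarith]
    exact Int.add_mul_emod_self_left _ _ _
  rw [key]
  split_ifs with h
  · rw [h]; exact Int.emod_self
  · exact Int.emod_eq_of_lt (by omega) (by omega)

-- A's loop for one student computes the cyclic-match count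
theorem pvLoop_eq (way : List Int) (hL : 0 < way.length) :
    ∀ (ans : List Int) (c s : Int), 0 ≤ s →
      ans.foldl (pvStepA way) (c, s % (way.length : Int)) =
        (c + ((PySem.List.enumerate ans s).countP
            (fun ia => ia.2 == PySem.List.pyGetD way (PySem.Int.mod ia.1 (way.length : Int)) 0) : Int),
         (s + ans.length) % (way.length : Int)) := by
  intro ans
  induction ans with
  | nil => intro c s hs; simp [PySem.List.enumerate_nil]
  | cons a t ih =>
    intro c s hs
    have hLp : (0 : Int) < (way.length : Int) := by exact_mod_cast hL
    have hstep : pvStepA way (c, s % (way.length : Int)) a =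
        ((if a = PySem.List.pyGetD way (s % (way.length : Int)) 0 then c + 1 else c),
         (s + 1) % (way.length : Int)) := by
      simp only [pvStepA]
      rw [Prod.mk.injEq]
      exact ⟨rfl, (pvModSucc s _ hLp).symm⟩
    rw [List.foldl_cons, hstep, ih _ (s + 1) (by omega)]
    rw [PySem.List.enumerate_cons, List.countP_cons]
    have hm : PySem.Int.mod s (way.length : Int) = s % (way.length : Int) :=
      PySem.Int.mod_eq_emod_of_pos hLp
    rw [Prod.mk.injEq]
    refine ⟨?_, by simp; congr 1; ring⟩
    · simp only [hm]
      by_cases h : a = PySem.List.pyGetD way (s % (way.length : Int)) 0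
      · simp [h]; ring
      · simp [h]

-- summing an indicator of a single residue over a duplicate-free range
theorem pvSumIte (rs : List Int) (r0 x : Int) (hnd : rs.Nodup) (hmem : r0 ∈ rs) :
    (rs.map (fun r => if r = r0 then x else 0)).sum = x := by
  induction rs with
  | nil => cases hmem
  | cons a t ih =>
    rw [List.map_cons, List.sum_cons]
    rcases List.mem_cons.mp hmem with h | h
    · have ht : r0 ∉ t := by rw [h]; exact (List.nodup_cons.mp hnd).1
      have hz : (t.map (fun r => if r = r0 then x else 0)).sum = 0 := by
        have he : t.map (fun r => if r = r0 then x else 0) = t.map (fun _ => (0:Int)) :=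
          List.map_congr_left (fun r hr => if_neg (fun he => ht (by rw [← he]; exact hr)))
        simp [he]
      rw [hz, if_pos h.symm]; omega
    · have hne : a ≠ r0 := fun he => (List.nodup_cons.mp hnd).1 (by rw [he]; exact h)
      rw [if_neg hne, ih (List.nodup_cons.mp hnd).2 h]; omega

-- the histogram's 40 lookups for key-function f count the matching entries of l
theorem pvHistSum (f : Int → Int) (l : List (Int × Int)) :
    ((PySem.List.pyRange 0 40 1).map
      (fun r => ((l.map (fun ia : Int × Int => (PySem.Int.mod ia.1 40, ia.2))).count (r, f r) : Int))).sum
    = (l.countP (fun ia => ia.2 == f (PySem.Int.mod ia.1 40)) : Int) := by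
  induction l with
  | nil => simp
  | cons a t ih =>
    simp only [List.map_cons]
    set r0 : Int := PySem.Int.mod a.1 40 with hr0
    have hmem : r0 ∈ PySem.List.pyRange 0 40 1 := by
      rw [PySem.List.mem_pyRange_one]
      exact ⟨PySem.Int.mod_nonneg a.1 (by norm_num), PySem.Int.mod_lt a.1 (by norm_num)⟩
    have hnd : (PySem.List.pyRange 0 40 1).Nodup := by decide
    have hcount : ∀ r : Int,
        (((r0, a.2) :: t.map (fun ia : Int × Int => (PySem.Int.mod ia.1 40, ia.2))).count (r, f r) : Int)
        = ((t.map (fun ia : Int × Int => (PySem.Int.mod ia.1 40, ia.2))).count (r, f r) : Int)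
          + (if (r0, a.2) = (r, f r) then 1 else 0) := by
      intro r
      rw [List.count_cons]
      simp only [beq_iff_eq]
      split_ifs <;> push_cast <;> omega
    rw [List.map_congr_left (fun r _ => hcount r), PySem.List.sum_map_add_int, ih]
    have hsplit : (PySem.List.pyRange 0 40 1).map
        (fun r => if (r0, a.2) = (r, f r) then (1 : Int) else 0)
        = (PySem.List.pyRange 0 40 1).map
        (fun r => if r = r0 then (if f r0 = a.2 then (1 : Int) else 0) else 0) := by
      refine List.map_congr_left (fun r _ => ?_)
      by_cases h1 : r = r0
      · rw [h1]
        by_cases h2 : f r0 = a.2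
        · rw [if_pos (by rw [h2]), if_pos rfl, if_pos h2]
        · rw [if_neg (fun hc => h2 (congrArg Prod.snd hc).symm), if_pos rfl, if_neg h2]
      · rw [if_neg (fun hc => h1 (congrArg Prod.fst hc).symm), if_neg h1]
    rw [hsplit, pvSumIte _ _ _ hnd hmem]
    have hre : PySem.Int.mod a.1 40 = a.1 % 40 := PySem.Int.mod_eq_emod_of_pos (by norm_num)
    simp only [List.countP_cons, hr0, hre]
    by_cases h : f (a.1 % 40) = a.2
    · rw [if_pos h, if_pos (beq_iff_eq.mpr h.symm)]
      push_cast; omega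
    · rw [if_neg h, if_neg (fun hc => h (beq_iff_eq.mp hc).symm)]
      push_cast; omega

-- B's score for one pattern is the cyclic-match count, since |w| divides 40
theorem pvScoreB_eq (answers w : List Int) (hL : 0 < w.length)
    (hdvd : (w.length : Int) ∣ 40) :
    pvScoreB (pvHist answers) w =
      ((PySem.List.enumerate answers).countP
        (fun ia => ia.2 == PySem.List.pyGetD w (PySem.Int.mod ia.1 (w.length : Int)) 0) : Int) := by
  have hLp : (0 : Int) < (w.length : Int) := by exact_mod_cast hL
  have hb : (0 : Int) < 40 := by norm_num
  -- the histogram lookup is a count of the key in the mapped key list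
  have hget : ∀ k : Int × Int,
      (pvHist answers).getD k 0 =
        (((PySem.List.enumerate answers).map
          (fun ia : Int × Int => (PySem.Int.mod ia.1 40, ia.2))).count k : Int) := by
    intro k
    have : pvHist answers =
        ((PySem.List.enumerate answers).map
          (fun ia : Int × Int => (PySem.Int.mod ia.1 40, ia.2))).foldl
          (fun d x => d.insert x (d.getD x 0 + 1)) PySem.Dict.empty := by
      simp [pvHist, List.foldl_map]
    rw [this, PySem.Dict.getD_foldl_insert_add_one, PySem.Dict.getD_empty]
    omega
  simp only [pvScoreB]
  have hmap : (PySem.List.pyRange 0 40 1).map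
      (fun r => (pvHist answers).getD (r, PySem.List.pyGetD w (PySem.Int.mod r (w.length : Int)) 0) 0)
      = (PySem.List.pyRange 0 40 1).map
      (fun r => (((PySem.List.enumerate answers).map
          (fun ia : Int × Int => (PySem.Int.mod ia.1 40, ia.2))).count
        (r, (fun x => PySem.List.pyGetD w (PySem.Int.mod x (w.length : Int)) 0) r) : Int)) :=
    List.map_congr_left (fun r _ => hget _)
  rw [hmap, pvHistSum]
  -- collapse the double modulus: (i % 40) % |w| = i % |w| since |w| | 40
  refine congrArg _ (List.countP_congr (fun ia _ => ?_))
  have : PySem.Int.mod (PySem.Int.mod ia.1 40) (w.length : Int) =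
      PySem.Int.mod ia.1 (w.length : Int) := by
    rw [PySem.Int.mod_eq_emod_of_pos hb, PySem.Int.mod_eq_emod_of_pos hLp,
        PySem.Int.mod_eq_emod_of_pos hLp]
    exact Int.emod_emod_of_dvd _ hdvd
  rw [this]

-- A's max-tracking loop, once the running max dominates the rest, collects exactly the elements at the max
theorem pvMaxLoop (l : List (Int × Int)) :
    ∀ (m : Int) (acc : List Int), (∀ p ∈ l, p.2 ≤ m) →
      l.foldl (fun (s : Int × List Int) p =>
          let mm := if s.1 < p.2 then p.2 else s.1
          (mm, if mm = p.2 then s.2 ++ [p.1] else s.2)) (m, acc) =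
        (m, acc ++ (l.filter (fun p => p.2 = m)).map (fun p => p.1)) := by
  induction l with
  | nil => intro m acc _; simp
  | cons q t ih =>
    intro m acc hle
    have hq : q.2 ≤ m := hle q (by simp)
    have hm : (if m < q.2 then q.2 else m) = m := by omega
    simp only [List.foldl_cons, hm]
    rw [ih m _ (fun p hp => hle p (by simp [hp]))]
    by_cases h : m = q.2
    · simp [h.symm]
    · have : ¬ q.2 = m := fun hh => h hh.symm
      simp [h, this]

-- given the three scores, A's sort-and-collect equals B's max-filter over range(3)
theorem pvSelect_eq (s1 s2 s3 : Int) (n1 : 0 ≤ s1) (n2 : 0 ≤ s2) (n3 : 0 ≤ s3) :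
    PySem.List.sorted
      (((PySem.List.sorted [((1:Int), s1), (2, s2), (3, s3)] (fun x => x.2) true).foldl
        (fun (s : Int × List Int) p =>
          ((if s.1 < p.2 then p.2 else s.1),
           if (if s.1 < p.2 then p.2 else s.1) = p.2 then s.2 ++ [p.1] else s.2))
        (0, [])).2) (fun x => x) false =
    (PySem.List.pyRange 0 3 1).filterMap
      (fun k => if PySem.List.pyGetD [s1, s2, s3] k 0 =
                  (PySem.List.max? [s1, s2, s3] (fun s => s)).getD 0
                then some (k + 1) else none) := by
  set cc : List (Int × Int) := [((1:Int), s1), (2, s2), (3, s3)] with hcc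
  -- best on the B side is the maximum of the three scores
  have hbest : (PySem.List.max? [s1, s2, s3] (fun s => s)).getD 0 = max (max s1 s2) s3 := by
    rw [PySem.List.max?_id_cons]; simp [max_assoc]
  rw [hbest]
  -- the reverse-sorted count list is nonempty
  obtain ⟨q, t, hqt⟩ : ∃ q t, PySem.List.sorted cc (fun x => x.2) true = q :: t := by
    rcases h : PySem.List.sorted cc (fun x => x.2) true with _ | ⟨q, t⟩
    · rw [PySem.List.sorted_eq_nil_iff] at h; simp [hcc] at h
    · exact ⟨q, t, rfl⟩
  have hperm : (PySem.List.sorted cc (fun x => x.2) true).Perm cc := PySem.List.sorted_perm ..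
  have hq_mem : q ∈ cc := hperm.mem_iff.mp (by rw [hqt]; exact List.mem_cons_self ..)
  have hq_ge : ∀ y ∈ cc, y.2 ≤ q.2 := PySem.List.key_head_sorted_rev_ge cc (fun x => x.2) hqt
  have hq_cases : q = (1, s1) ∨ q = (2, s2) ∨ q = (3, s3) := by simpa [hcc] using hq_mem
  have hqM : q.2 = max (max s1 s2) s3 := by
    have h1 := hq_ge (1, s1) (by simp [hcc])
    have h2 := hq_ge (2, s2) (by simp [hcc])
    have h3 := hq_ge (3, s3) (by simp [hcc])
    simp only at h1 h2 h3
    rcases hq_cases with h | h | h <;> subst h <;> simp [max_def] at h1 h2 h3 ⊢ <;> split_ifs <;> omega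
  have hpw : (PySem.List.sorted cc (fun x => x.2) true).Pairwise (fun a b => b.2 ≤ a.2) :=
    PySem.List.sorted_pairwise_rev ..
  have ht_le : ∀ p ∈ t, p.2 ≤ q.2 := by
    rw [hqt] at hpw; exact fun p hp => (List.pairwise_cons.mp hpw).1 p hp
  -- run A's max-tracking loop
  rw [hqt, List.foldl_cons]
  have hstep1 : ((if (0:Int) < q.2 then q.2 else 0),
      if (if (0:Int) < q.2 then q.2 else 0) = q.2 then ([] : List Int) ++ [q.1] else []) =
      (q.2, [q.1]) := by
    have hq_nonneg : 0 ≤ q.2 := by rcases hq_cases with h | h | h <;> simp [h] <;> omega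
    have : (if (0:Int) < q.2 then q.2 else 0) = q.2 := by omega
    rw [this]; simp
  rw [hstep1, pvMaxLoop t q.2 [q.1] ht_le]
  -- A's winners are the max-scoring entries of the sorted list, in its order
  have hfin : ([q.1] ++ (t.filter (fun p => p.2 = q.2)).map (fun p => p.1)) =
      (((q :: t).filter (fun p => p.2 = q.2)).map (fun p => p.1)) := by
    simp
  -- B's winners list, in ascending student order
  have hW : (PySem.List.pyRange 0 3 1).filterMap
      (fun k => if PySem.List.pyGetD [s1, s2, s3] k 0 = max (max s1 s2) s3
                then some (k + 1) else none) =
      ((cc.filter (fun p => p.2 = q.2)).map (fun p => p.1)) := by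
    rw [hqM]
    have hr3 : PySem.List.pyRange 0 3 1 = [(0 : Int), 1, 2] := by decide
    have g0 : PySem.List.pyGetD [s1, s2, s3] (0:Int) 0 = s1 := by simp [pysem]
    have g1 : PySem.List.pyGetD [s1, s2, s3] (1:Int) 0 = s2 := by simp [pysem]
    have g2 : PySem.List.pyGetD [s1, s2, s3] (2:Int) 0 = s3 := by simp [pysem]
    rw [hr3]
    simp only [List.filterMap_cons, List.filterMap_nil, g0, g1, g2, hcc, List.filter_cons,
      List.filter_nil, decide_eq_true_eq]
    split_ifs <;> norm_num
  simp only [hfin, hW]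
  -- both are the same set of students; B's is strictly increasing, so sorting A's gives B's
  have hsub : ((cc.filter (fun p => p.2 = q.2)).map (fun p => p.1)).Pairwise (· < ·) := by
    have h1 : (cc.filter (fun p => p.2 = q.2)).Sublist cc := List.filter_sublist ..
    have h2 := h1.map (fun p : Int × Int => p.1)
    have h3 : (cc.map (fun p : Int × Int => p.1)).Pairwise (· < ·) := by
      simp [hcc]
    exact h3.sublist h2
  have hp2 : (((q :: t).filter (fun p => p.2 = q.2)).map (fun p => p.1)).Perm
      ((cc.filter (fun p => p.2 = q.2)).map (fun p => p.1)) := by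
    rw [← hqt]; exact (hperm.filter _).map _
  exact PySem.List.sorted_eq_of_perm_of_pairwise_lt _ _ _ hp2.symm hsub

-- ===== VERDICT (by name: the statement is the Claim_ definition above) =====
theorem solution_spec : Claim_equal_solution := by
  unfold Claim_equal_solution Spec_solution
  intro answers _
  have h1 := pvLoop_eq [1, 2, 3, 4, 5] (by decide) answers 0 0 (le_refl 0)
  have h2 := pvLoop_eq [2, 1, 2, 3, 2, 4, 2, 5] (by decide) answers 0 0 (le_refl 0)
  have h3 := pvLoop_eq [3, 3, 1, 1, 2, 2, 4, 4, 5, 5] (by decide) answers 0 0 (le_refl 0)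
  simp only [Int.zero_emod, zero_add] at h1 h2 h3
  have b1 := pvScoreB_eq answers [1, 2, 3, 4, 5] (by decide) (by decide)
  have b2 := pvScoreB_eq answers [2, 1, 2, 3, 2, 4, 2, 5] (by decide) (by decide)
  have b3 := pvScoreB_eq answers [3, 3, 1, 1, 2, 2, 4, 4, 5, 5] (by decide) (by decide)
  simp only [solution, solution_alt, List.map_cons, List.map_nil]
  rw [PySem.List.foldl_prod_mk (f := pvStepA [1, 2, 3, 4, 5])
      (g := fun (s : (Int × Int) × (Int × Int)) ans =>
        (pvStepA [2, 1, 2, 3, 2, 4, 2, 5] s.1 ans, pvStepA [3, 3, 1, 1, 2, 2, 4, 4, 5, 5] s.2 ans)),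
    PySem.List.foldl_prod_mk (f := pvStepA [2, 1, 2, 3, 2, 4, 2, 5])
      (g := pvStepA [3, 3, 1, 1, 2, 2, 4, 4, 5, 5]),
    h1, h2, h3]
  simp only [b1, b2, b3]
  apply pvSelect_eq <;> exact Int.natCast_nonneg _
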